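-- pv_equiv track=rewrite | github.com/sebastianNietoMolina/CNYT | Complejos.py | crarGrafo
-- ===== SOURCE A (Python) =====
-- def crarGrafo(dim,temp):
--     grafo=[]
--     for i in range(dim):
--         row=[]
--         for j in range(dim):
--             if i==temp and j==temp:
--                 row.append((1,0))
--                 temp+=1
--             else:
--                 row.append((0,0))
--         grafo.append(row)
--     return grafo
-- ===== SOURCE B (Python) =====
-- def crarGrafo(dim, temp):
--     zero = [(0, 0)] * dim
--     start = temp if 0 <= temp < dim else dim
--     head = [zero[:] for _ in range(start)]
--     tail = [zero[:i] + [(1, 0)] + zero[i + 1:] for i in range(start, dim)]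
--     return head + tail
-- ===== Notes on version B (the rewrite author's own statement) =====
-- stated objective: alternative
-- what changed: B eliminates the mutating temp entirely: it computes the closed-form start index of the ones (temp if 0 <= temp < dim else dim) once, then builds the matrix as start copies of the zero row followed by rows assembled by slice concatenation zero[:i] + [(1,0)] + zero[i+1:], instead of A's nested double loop with a per-cell branch and temp += 1.
import Mathlib
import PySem

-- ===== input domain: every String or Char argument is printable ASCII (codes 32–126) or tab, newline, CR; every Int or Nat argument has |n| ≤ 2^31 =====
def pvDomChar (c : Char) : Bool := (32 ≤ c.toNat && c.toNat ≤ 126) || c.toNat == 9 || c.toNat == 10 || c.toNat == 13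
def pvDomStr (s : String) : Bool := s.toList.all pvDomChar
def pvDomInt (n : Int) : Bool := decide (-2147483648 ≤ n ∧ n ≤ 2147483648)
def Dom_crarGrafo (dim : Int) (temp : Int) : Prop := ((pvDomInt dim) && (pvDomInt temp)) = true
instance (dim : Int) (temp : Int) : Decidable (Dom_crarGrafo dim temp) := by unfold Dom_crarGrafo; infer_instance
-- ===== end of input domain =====

-- B replaces A's mutating temp with its closed-form start index and builds each one-row by
-- slice concatenation (alternative decomposition); same matrix on all int inputs.

-- ===== PORT A =====
-- A's inner loop body: on the diagonal match append (1,0) and bump temp, else append (0,0)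
def pvInnerStepA (i : Int) (rt : List (Int × Int) × Int) (j : Int) : List (Int × Int) × Int :=
  if i = rt.2 ∧ j = rt.2 then (rt.1 ++ [((1 : Int), (0 : Int))], rt.2 + 1)
  else (rt.1 ++ [((0 : Int), (0 : Int))], rt.2)

-- A's outer loop body: build row with the inner loop over range(dim), append it, thread temp
def pvStepA (dim : Int) (st : List (List (Int × Int)) × Int) (i : Int) :
    List (List (Int × Int)) × Int :=
  let inner := (PySem.List.pyRange 0 dim 1).foldl (pvInnerStepA i) (([] : List (Int × Int)), st.2)
  (st.1 ++ [inner.1], inner.2)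

-- nested double loop appending cell by cell, threading the mutating temp
def crarGrafo (dim : Int) (temp : Int) : List (List (Int × Int)) :=
  ((PySem.List.pyRange 0 dim 1).foldl (pvStepA dim)
    (([] : List (List (Int × Int))), temp)).1

-- ===== PORT B =====
-- zero = [(0,0)]*dim; start = temp if 0 <= temp < dim else dim;
-- head = [zero[:] for _ in range(start)];
-- tail = [zero[:i] + [(1,0)] + zero[i+1:] for i in range(start, dim)]; head + tail
def crarGrafo_alt (dim : Int) (temp : Int) : List (List (Int × Int)) :=
  let zero : List (Int × Int) := List.replicate dim.toNat ((0 : Int), (0 : Int))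
  let start : Int := if 0 ≤ temp ∧ temp < dim then temp else dim
  let head := (PySem.List.pyRange 0 start 1).map (fun _ => PySem.List.slice zero none none)
  let tail := (PySem.List.pyRange start dim 1).map (fun i =>
    PySem.List.slice zero none (some i) ++ [((1 : Int), (0 : Int))]
      ++ PySem.List.slice zero (some (i + 1)) none)
  head ++ tail

-- ===== PRECONDITION & SPEC =====
def Spec_crarGrafo (dim : Int) (temp : Int) (out : List (List (Int × Int))) : Prop := out = crarGrafo_alt dim temp
instance (dim : Int) (temp : Int) (out : List (List (Int × Int))) : Decidable (Spec_crarGrafo dim temp out) := by unfold Spec_crarGrafo; infer_instance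

-- ===== CLAIM (what is proved, stated in full; the proofs are below) =====
def Claim_equal_crarGrafo : Prop := ∀ (dim : Int) (temp : Int), Dom_crarGrafo dim temp → Spec_crarGrafo dim temp (crarGrafo dim temp)

-- ===== LEMMAS AND PROOFS =====

/-- the all-zeros row -/
def pvZRow (dim : Int) : List (Int × Int) := List.replicate dim.toNat ((0 : Int), (0 : Int))

/-- a row of the final matrix: a 1 on the diagonal iff temp has reached i -/
def pvSpecRow (dim a t i : Int) : List (Int × Int) :=
  if a ≤ t ∧ t ≤ i then (pvZRow dim).set i.toNat ((1 : Int), (0 : Int)) else pvZRow dim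

/-- A's inner loop: appends a one-hot (or all-zero) row, temp advances iff it matched -/
theorem pvInnerA (dim : Int) (i : Int) :
    ∀ (n : ℕ) (a t : Int) (acc : List (Int × Int)), n = (dim - a).toNat →
    (PySem.List.pyRange a dim 1).foldl (pvInnerStepA i) (acc, t)
      = (acc ++ (PySem.List.pyRange a dim 1).map
            (fun j => if i = t ∧ j = t then ((1 : Int), (0 : Int)) else ((0 : Int), (0 : Int))),
         if i = t ∧ a ≤ t ∧ t < dim then t + 1 else t) := by
  intro n
  induction n with
  | zero =>
    intro a t acc hn
    have hba : dim ≤ a := by omega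
    rw [PySem.List.pyRange_one_eq_nil hba]
    simp only [List.foldl_nil, List.map_nil, List.append_nil]
    rw [if_neg (by rintro ⟨_, h1, h2⟩; omega)]
  | succ m ih =>
    intro a t acc hn
    by_cases hab : a < dim
    · rw [PySem.List.pyRange_one_cons hab]
      simp only [List.foldl_cons, List.map_cons]
      by_cases hmatch : i = t ∧ a = t
      · rw [show pvInnerStepA i (acc, t) a = (acc ++ [((1:Int),(0:Int))], t + 1) from by
          simp [pvInnerStepA, hmatch]]
        rw [ih (a + 1) (t + 1) (acc ++ [((1 : Int), (0 : Int))]) (by omega)]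
        obtain ⟨hit, hat⟩ := hmatch
        simp only [Prod.mk.injEq]
        constructor
        · rw [if_pos ⟨hit, hat⟩, List.append_assoc]
          congr 1
          simp only [List.cons_append, List.nil_append]
          congr 1
          apply List.map_congr_left
          intro j hj
          rw [PySem.List.mem_pyRange_one] at hj
          rw [if_neg (by rintro ⟨h, _⟩; omega), if_neg (by rintro ⟨_, h⟩; omega)]
        · rw [if_neg (by rintro ⟨h, _⟩; omega), if_pos ⟨hit, by omega, by omega⟩]
      · rw [show pvInnerStepA i (acc, t) a = (acc ++ [((0:Int),(0:Int))], t) from by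
          simp [pvInnerStepA, hmatch]]
        rw [ih (a + 1) t (acc ++ [((0 : Int), (0 : Int))]) (by omega)]
        simp only [Prod.mk.injEq]
        constructor
        · rw [if_neg hmatch, List.append_assoc]
          simp
        · by_cases hit : i = t
          · have hat : a ≠ t := fun h => hmatch ⟨hit, h⟩
            rw [if_congr (show (i = t ∧ a + 1 ≤ t ∧ t < dim) ↔ (i = t ∧ a ≤ t ∧ t < dim) from by
              constructor <;> rintro ⟨h1, h2, h3⟩ <;> exact ⟨h1, by omega, h3⟩) rfl rfl]
          · rw [if_neg (by rintro ⟨h, _⟩; exact hit h),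
              if_neg (by rintro ⟨h, _⟩; exact hit h)]
    · exfalso; omega

/-- a one-hot map over range 0 dim is replicate-then-set -/
theorem pvMapRow (dim t : Int) (ht0 : 0 ≤ t) (x y : Int × Int) :
    (PySem.List.pyRange 0 dim 1).map (fun j => if j = t then x else y)
      = (List.replicate dim.toNat y).set t.toNat x := by
  apply List.ext_getElem
  · simp [PySem.List.length_pyRange_one]
  · intro k hk1 hk2
    simp only [List.length_map, PySem.List.length_pyRange_one] at hk1
    rw [List.getElem_map, PySem.List.getElem_pyRange_one, List.getElem_set]
    simp only [List.getElem_replicate]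
    rw [if_congr (show ((0 : Int) + (k : Int) = t) ↔ ((k : Int) = t) from by omega) rfl rfl]
    by_cases h : (k : Int) = t
    · have : t.toNat = k := by omega
      simp [this, h]
    · have : t.toNat ≠ k := by omega
      simp [this, h]

/-- a constant map over range 0 dim is replicate -/
theorem pvMapZero (dim : Int) (c : Int × Int) :
    (PySem.List.pyRange 0 dim 1).map (fun _ => c) = List.replicate dim.toNat c := by
  rw [List.map_const']
  simp [PySem.List.length_pyRange_one]

/-- A's inner loop result, as a spec row, for a row index 0 ≤ i < dim -/
theorem pvInnerA' (dim i t : Int) (hi0 : 0 ≤ i) (hi1 : i < dim) :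
    (PySem.List.pyRange 0 dim 1).foldl (pvInnerStepA i) (([] : List (Int × Int)), t)
      = (if i = t then (pvZRow dim).set i.toNat ((1 : Int), (0 : Int)) else pvZRow dim,
         if i = t then t + 1 else t) := by
  rw [pvInnerA dim i (dim - 0).toNat 0 t [] rfl]
  simp only [Prod.mk.injEq, List.nil_append]
  by_cases hit : i = t
  · subst hit
    refine ⟨?_, ?_⟩
    · rw [if_pos rfl,
        show (fun j => if i = i ∧ j = i then ((1:Int),(0:Int)) else ((0:Int),(0:Int)))
            = (fun j => if j = i then ((1:Int),(0:Int)) else ((0:Int),(0:Int))) from by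
          funext j; by_cases h : j = i <;> simp [h]]
      exact pvMapRow dim i hi0 _ _
    · rw [if_pos ⟨rfl, hi0, hi1⟩, if_pos rfl]
  · refine ⟨?_, ?_⟩
    · rw [if_neg hit,
        show (fun j => if i = t ∧ j = t then ((1:Int),(0:Int)) else ((0:Int),(0:Int)))
            = (fun _ => ((0:Int),(0:Int))) from by
          funext j; rw [if_neg (by rintro ⟨h, _⟩; exact hit h)]]
      exact pvMapZero dim _
    · rw [if_neg (by rintro ⟨h, _⟩; exact hit h), if_neg hit]

/-- A's outer loop computes the spec rows -/
theorem pvOuterA (dim : Int) :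
    ∀ (n : ℕ) (a t : Int) (acc : List (List (Int × Int))), n = (dim - a).toNat → 0 ≤ a →
    (PySem.List.pyRange a dim 1).foldl (pvStepA dim) (acc, t)
      = (acc ++ (PySem.List.pyRange a dim 1).map (pvSpecRow dim a t),
         if a ≤ t ∧ t < dim then dim else t) := by
  intro n
  induction n with
  | zero =>
    intro a t acc hn ha
    have hba : dim ≤ a := by omega
    rw [PySem.List.pyRange_one_eq_nil hba]
    simp only [List.foldl_nil, List.map_nil, List.append_nil]
    rw [if_neg (by rintro ⟨h1, h2⟩; omega)]
  | succ m ih =>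
    intro a t acc hn ha
    by_cases hab : a < dim
    · rw [PySem.List.pyRange_one_cons hab]
      simp only [List.foldl_cons, List.map_cons]
      rw [show pvStepA dim (acc, t) a
            = (acc ++ [if a = t then (pvZRow dim).set a.toNat ((1:Int),(0:Int)) else pvZRow dim],
               if a = t then t + 1 else t) from by
        simp only [pvStepA]
        rw [pvInnerA' dim a t ha hab]]
      by_cases hat : a = t
      · subst hat
        simp only [if_true]
        rw [ih (a + 1) (a + 1) _ (by omega) (by omega)]
        simp only [Prod.mk.injEq]
        refine ⟨?_, ?_⟩
        · rw [List.append_assoc]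
          congr 1
          simp only [List.cons_append, List.nil_append]
          congr 1
          · rw [pvSpecRow, if_pos ⟨le_rfl, le_rfl⟩]
          · apply List.map_congr_left
            intro i hi
            rw [PySem.List.mem_pyRange_one] at hi
            rw [pvSpecRow, pvSpecRow,
              if_congr (show a + 1 ≤ a + 1 ∧ a + 1 ≤ i ↔ a ≤ a ∧ a ≤ i from by omega) rfl rfl]
        · split_ifs <;> omega
      · simp only [if_neg hat]
        rw [ih (a + 1) t _ (by omega) (by omega)]
        simp only [Prod.mk.injEq]
        refine ⟨?_, ?_⟩
        · rw [List.append_assoc]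
          congr 1
          simp only [List.cons_append, List.nil_append]
          congr 1
          · rw [pvSpecRow, if_neg (by rintro ⟨h1, h2⟩; omega)]
          · apply List.map_congr_left
            intro i hi
            rw [PySem.List.mem_pyRange_one] at hi
            rw [pvSpecRow, pvSpecRow,
              if_congr (show a + 1 ≤ t ∧ t ≤ i ↔ a ≤ t ∧ t ≤ i from by omega) rfl rfl]
        · split_ifs <;> omega
    · exfalso; omega

/-- B's slice-built row is the zero row with the diagonal cell set -/
theorem pvSliceRow (dim i : Int) (hi0 : 0 ≤ i) (hi1 : i < dim) :
    PySem.List.slice (pvZRow dim) none (some i) ++ [((1 : Int), (0 : Int))]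
      ++ PySem.List.slice (pvZRow dim) (some (i + 1)) none
      = (pvZRow dim).set i.toNat ((1 : Int), (0 : Int)) := by
  rw [PySem.List.slice_to _ hi0, PySem.List.slice_from _ (by omega)]
  have hlt : i.toNat < (pvZRow dim).length := by
    simp only [pvZRow, List.length_replicate]; omega
  rw [List.set_eq_take_append_cons_drop]
  rw [if_pos hlt]
  have : (i + 1).toNat = i.toNat + 1 := by omega
  simp [this]

/-- B computes the spec rows -/
theorem pvAltSpec (dim temp : Int) :
    crarGrafo_alt dim temp = (PySem.List.pyRange 0 dim 1).map (pvSpecRow dim 0 temp) := by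
  unfold crarGrafo_alt
  simp only [PySem.List.slice_none_none]
  by_cases h : 0 ≤ temp ∧ temp < dim
  · rw [if_pos h,
      PySem.List.pyRange_one_append 0 temp dim h.1 (le_of_lt h.2), List.map_append]
    congr 1
    · apply List.map_congr_left
      intro i hi
      rw [PySem.List.mem_pyRange_one] at hi
      rw [pvSpecRow, if_neg (by rintro ⟨h1, h2⟩; omega)]
      rfl
    · apply List.map_congr_left
      intro i hi
      rw [PySem.List.mem_pyRange_one] at hi
      rw [pvSpecRow, if_pos ⟨h.1, hi.1⟩]
      exact pvSliceRow dim i (by omega) hi.2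
  · rw [if_neg h, PySem.List.pyRange_one_eq_nil le_rfl]
    simp only [List.map_nil, List.append_nil]
    apply List.map_congr_left
    intro i hi
    rw [PySem.List.mem_pyRange_one] at hi
    rw [pvSpecRow, if_neg (by rintro ⟨h1, h2⟩; exact h ⟨h1, by omega⟩)]
    rfl

-- ===== VERDICT (by name: the statement is the Claim_ definition above) =====
theorem crarGrafo_spec : Claim_equal_crarGrafo := by
  intro dim temp _
  unfold Spec_crarGrafo crarGrafo
  rw [pvOuterA dim (dim - 0).toNat 0 temp [] rfl le_rfl, pvAltSpec]
  simp
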